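-- pv_equiv track=rewrite | github.com/Jeanzalez/Soluciones-de-Online-Judge---UVA | discrete.py | atraparLadron
-- ===== SOURCE A (Python) =====
-- def atraparLadron(posicionInicialLadron, u, v):
--     posicionInicialPolicia=(0,0)
--     velocidadPolicia=(0,0)
--     tiempo=0
--     while(posicionInicialPolicia[0] < posicionInicialLadron[0] or posicionInicialPolicia[1] < posicionInicialLadron[1]):
--         posicionInicialLadron=(posicionInicialLadron[0]+u,posicionInicialLadron[1]+v)
--         xPrimaPolicia=posicionInicialPolicia[0]+velocidadPolicia[0]+1
--         yPrimaPolicia=posicionInicialPolicia[1]+velocidadPolicia[1]+1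
--         velocidadPolicia=(xPrimaPolicia-posicionInicialPolicia[0],yPrimaPolicia-posicionInicialPolicia[1])
--         posicionInicialPolicia=(xPrimaPolicia,yPrimaPolicia)
--         tiempo+=1
--     return(tiempo)
-- ===== SOURCE B (Python) =====
-- def atraparLadron(posicionInicialLadron, u, v):
--     # O(log) closed-form search: the police is at t*(t+1)/2 in each coordinate after t
--     # steps, the thief at start + t*speed; binary-search each quadratic inequality.
--     x0 = posicionInicialLadron[0]
--     y0 = posicionInicialLadron[1]
--
--     def g(c0, w, t):
--         # police coordinate minus thief coordinate after t steps
--         return t * (t + 1) // 2 - w * t - c0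
--
--     def first_ge(c0, w):
--         # least t >= m with g(c0, w, t) >= 0, where g is nondecreasing for t >= m
--         lo = w - 1 if w >= 1 else 0
--         hi = lo + 2 * abs(w) + 2 * abs(c0) + 1
--         while lo < hi:
--             mid = (lo + hi) // 2
--             if g(c0, w, mid) >= 0:
--                 hi = mid
--             else:
--                 lo = mid + 1
--         return lo
--
--     bx = first_ge(x0, u)
--     by = first_ge(y0, v)
--     return min(t for t in (0, bx, by, max(bx, by))
--                if g(x0, u, t) >= 0 and g(y0, v, t) >= 0)
-- ===== Notes on version B (the rewrite author's own statement) =====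
-- stated objective: faster
-- what changed: B replaces A's step-by-step simulation of the chase (one loop iteration per time unit until the police position t*(t+1)/2 passes the thief in both coordinates) with a binary search on each of the two quadratic catch-up inequalities plus an O(1) combination of the four candidate times {0, bx, by, max}.
import Mathlib
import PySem

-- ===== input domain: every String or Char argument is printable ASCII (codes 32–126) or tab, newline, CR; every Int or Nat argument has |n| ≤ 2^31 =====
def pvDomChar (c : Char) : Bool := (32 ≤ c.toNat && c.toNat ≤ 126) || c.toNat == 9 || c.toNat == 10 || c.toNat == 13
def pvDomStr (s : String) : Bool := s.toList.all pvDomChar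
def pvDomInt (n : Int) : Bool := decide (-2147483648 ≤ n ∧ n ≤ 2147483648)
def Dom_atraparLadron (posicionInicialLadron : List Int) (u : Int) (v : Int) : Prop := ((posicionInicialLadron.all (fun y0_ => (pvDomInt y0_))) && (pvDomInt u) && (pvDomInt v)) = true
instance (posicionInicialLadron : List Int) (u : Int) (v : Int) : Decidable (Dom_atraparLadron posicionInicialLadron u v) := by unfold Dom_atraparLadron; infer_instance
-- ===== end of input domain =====

-- ===== PORT A =====
-- B changes the O(answer) step-by-step chase simulation into an O(log) binary search
-- on the two quadratic catch-up inequalities (objective: faster).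
-- A raises IndexError when the list has fewer than 2 elements; Pre_ excludes that.

-- the while loop of A; fuel only makes the recursion total (proved never exhausted inside Pre_)
def atraparLoop (u v : Int) : Nat → Int × Int → Int × Int → Int × Int → Int → Int
  | 0, _, _, _, tiempo => tiempo
  | fuel + 1, ladron, policia, velocidad, tiempo =>
    if policia.1 < ladron.1 ∨ policia.2 < ladron.2 then
      let xPrima := policia.1 + velocidad.1 + 1
      let yPrima := policia.2 + velocidad.2 + 1
      atraparLoop u v fuel (ladron.1 + u, ladron.2 + v) (xPrima, yPrima)
        (xPrima - policia.1, yPrima - policia.2) (tiempo + 1)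
    else tiempo

def atraparLadron (posicionInicialLadron : List Int) (u : Int) (v : Int) : Int :=
  let x0 := (PySem.List.pyGet? posicionInicialLadron 0).getD 0
  let y0 := (PySem.List.pyGet? posicionInicialLadron 1).getD 0
  atraparLoop u v (2 * (u.natAbs + v.natAbs + x0.natAbs + y0.natAbs) + 2) (x0, y0) (0, 0) (0, 0) 0

-- ===== PORT B =====
-- g(c0, w, t) = t*(t+1)//2 - w*t - c0  (police coordinate minus thief coordinate after t steps)
def pvG (c0 w t : Int) : Int := PySem.Int.floordiv (t * (t + 1)) 2 - w * t - c0

-- the while-loop of Source B's first_ge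
def pvBS (c0 w lo hi : Int) : Int :=
  if _h : lo < hi then
    let mid := PySem.Int.floordiv (lo + hi) 2
    if 0 ≤ pvG c0 w mid then pvBS c0 w lo mid else pvBS c0 w (mid + 1) hi
  else lo
termination_by (hi - lo).toNat
decreasing_by
  · have hb := PySem.Int.floordiv_two_mid_bounds (le_of_lt _h)
    have hlt : PySem.Int.floordiv (lo + hi) 2 < hi :=
      (PySem.Int.floordiv_lt_iff_lt_mul (by norm_num)).2 (by omega)
    omega
  · have hb := PySem.Int.floordiv_two_mid_bounds (le_of_lt _h)
    omega

def pvFirstGe (c0 w : Int) : Int :=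
  let lo := if 1 ≤ w then w - 1 else 0
  pvBS c0 w lo (lo + 2 * |w| + 2 * |c0| + 1)

def atraparLadron_alt (posicionInicialLadron : List Int) (u : Int) (v : Int) : Int :=
  let x0 := (PySem.List.pyGet? posicionInicialLadron 0).getD 0
  let y0 := (PySem.List.pyGet? posicionInicialLadron 1).getD 0
  let bx := pvFirstGe x0 u
  let bY := pvFirstGe y0 v
  let cands := [0, bx, bY, max bx bY].filter
    (fun t => decide (0 ≤ pvG x0 u t) && decide (0 ≤ pvG y0 v t))
  (PySem.List.min? cands (fun t => t)).getD 0

-- ===== PRECONDITION & SPEC =====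
-- Pre_ excludes exactly the lists of length < 2, on which A raises IndexError.
def Pre_atraparLadron (posicionInicialLadron : List Int) (u : Int) (v : Int) : Prop :=
  2 ≤ posicionInicialLadron.length

instance (posicionInicialLadron : List Int) (u : Int) (v : Int) :
    Decidable (Pre_atraparLadron posicionInicialLadron u v) := by
  unfold Pre_atraparLadron; infer_instance

def pvWitness_atraparLadron : List Int × Int × Int := ([3, 4], 1, 1)

def Spec_atraparLadron (posicionInicialLadron : List Int) (u : Int) (v : Int) (out : Int) : Prop := out = atraparLadron_alt posicionInicialLadron u v
instance (posicionInicialLadron : List Int) (u : Int) (v : Int) (out : Int) : Decidable (Spec_atraparLadron posicionInicialLadron u v out) := by unfold Spec_atraparLadron; infer_instance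

-- ===== CLAIM (what is proved, stated in full; the proofs are below) =====
def Claim_equal_atraparLadron : Prop := ∀ (posicionInicialLadron : List Int) (u : Int) (v : Int), Dom_atraparLadron posicionInicialLadron u v → Pre_atraparLadron posicionInicialLadron u v → Spec_atraparLadron posicionInicialLadron u v (atraparLadron posicionInicialLadron u v)

-- ===== LEMMAS AND PROOFS =====

theorem twoG (c0 w t : Int) : 2 * pvG c0 w t = t * t + t - 2 * w * t - 2 * c0 := by
  obtain ⟨k, hk⟩ := Int.even_mul_succ_self t
  have h2 : PySem.Int.floordiv (t * (t + 1)) 2 = k := by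
    rw [PySem.Int.floordiv_eq_iff_of_pos (by norm_num)]
    constructor <;> nlinarith
  simp only [pvG, h2]
  nlinarith

theorem g_mono (c0 w : Int) {s t : Int} (hw : w - 1 ≤ s) (h0 : 0 ≤ s) (hst : s ≤ t) :
    pvG c0 w s ≤ pvG c0 w t := by
  rcases eq_or_lt_of_le hst with h | h
  · subst h; exact le_refl _
  · have hp : 0 ≤ (t - s) * (t + s + 1 - 2 * w) :=
      mul_nonneg (by omega) (by omega)
    nlinarith [twoG c0 w s, twoG c0 w t]

theorem g_anti (c0 w : Int) {s t : Int} (h0 : 0 ≤ s) (hst : s ≤ t) (ht : t ≤ w - 1) :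
    pvG c0 w t ≤ pvG c0 w s := by
  have hp : (t - s) * (t + s + 1 - 2 * w) ≤ 0 :=
    mul_nonpos_of_nonneg_of_nonpos (by omega) (by omega)
  nlinarith [twoG c0 w s, twoG c0 w t]

theorem g_big (c0 w t : Int) (h : 2 * |w| + 2 * |c0| + 1 ≤ t) : 0 ≤ pvG c0 w t := by
  have h1 : w ≤ |w| := le_abs_self w
  have h2 : c0 ≤ |c0| := le_abs_self c0
  have h3 : (0:Int) ≤ |w| := abs_nonneg w
  have h4 : (0:Int) ≤ |c0| := abs_nonneg c0
  have h5 : (2:Int) ≤ t + 1 - 2 * w := by omega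
  have h6 : t * 2 ≤ t * (t + 1 - 2 * w) :=
    mul_le_mul_of_nonneg_left h5 (by omega)
  nlinarith [twoG c0 w t]

theorem bs_spec (c0 w m : Int) (hm : w - 1 ≤ m) (hm0 : 0 ≤ m) :
    ∀ (n : Nat) (lo hi : Int), (hi - lo).toNat = n → m ≤ lo → lo ≤ hi → 0 ≤ pvG c0 w hi →
      (∀ s, m ≤ s → s < lo → pvG c0 w s < 0) →
      lo ≤ pvBS c0 w lo hi ∧ pvBS c0 w lo hi ≤ hi ∧ 0 ≤ pvG c0 w (pvBS c0 w lo hi) ∧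
        ∀ s, m ≤ s → s < pvBS c0 w lo hi → pvG c0 w s < 0 := by
  intro n
  induction n using Nat.strong_induction_on with
  | _ n ih =>
    intro lo hi hn hmlo hlohi hghi hlow
    rw [pvBS]
    simp only []
    split_ifs with h1 h2
    · -- lo < hi, 0 ≤ g mid : recurse on (lo, mid)
      have hb := PySem.Int.floordiv_two_mid_bounds (le_of_lt h1)
      have hlt : PySem.Int.floordiv (lo + hi) 2 < hi :=
        (PySem.Int.floordiv_lt_iff_lt_mul (by norm_num)).2 (by omega)
      have hres := ih ((PySem.Int.floordiv (lo + hi) 2 - lo).toNat) (by omega) lo _ rfl hmlo hb.1 h2 hlow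
      exact ⟨hres.1, by omega, hres.2.2.1, hres.2.2.2⟩
    · -- lo < hi, g mid < 0 : recurse on (mid+1, hi)
      have hb := PySem.Int.floordiv_two_mid_bounds (le_of_lt h1)
      have hlt : PySem.Int.floordiv (lo + hi) 2 < hi :=
        (PySem.Int.floordiv_lt_iff_lt_mul (by norm_num)).2 (by omega)
      have hlow' : ∀ s, m ≤ s → s < PySem.Int.floordiv (lo + hi) 2 + 1 → pvG c0 w s < 0 := by
        intro s hms hs
        by_cases hslo : s < lo
        · exact hlow s hms hslo
        · have : pvG c0 w s ≤ pvG c0 w (PySem.Int.floordiv (lo + hi) 2) :=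
            g_mono c0 w (by omega) (by omega) (by omega)
          omega
      have hres := ih ((hi - (PySem.Int.floordiv (lo + hi) 2 + 1)).toNat) (by omega) _ hi rfl
        (by omega) (by omega) hghi hlow'
      exact ⟨by omega, hres.2.1, hres.2.2.1, hres.2.2.2⟩
    · -- lo = hi : return lo
      have : lo = hi := by omega
      subst this
      exact ⟨le_refl _, le_refl _, hghi, fun s hms hs => hlow s hms hs⟩

theorem firstGe_spec (c0 w : Int) :
    0 ≤ pvFirstGe c0 w ∧ w - 1 ≤ pvFirstGe c0 w ∧ 0 ≤ pvG c0 w (pvFirstGe c0 w) ∧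
      ∀ s, 0 ≤ s → w - 1 ≤ s → s < pvFirstGe c0 w → pvG c0 w s < 0 := by
  have h3 : (0:Int) ≤ |w| := abs_nonneg w
  have h4 : (0:Int) ≤ |c0| := abs_nonneg c0
  have h1 : w ≤ |w| := le_abs_self w
  simp only [pvFirstGe]
  set m : Int := if 1 ≤ w then w - 1 else 0 with hmdef
  have hm : w - 1 ≤ m := by simp only [hmdef]; split_ifs <;> omega
  have hm0 : 0 ≤ m := by simp only [hmdef]; split_ifs <;> omega
  have hghi : 0 ≤ pvG c0 w (m + 2 * |w| + 2 * |c0| + 1) := g_big c0 w _ (by omega)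
  have h := bs_spec c0 w m hm hm0 _ m (m + 2 * |w| + 2 * |c0| + 1) rfl (le_refl m)
    (by omega) hghi (fun s hms hs => absurd hms (by omega))
  refine ⟨by omega, by omega, h.2.2.1, ?_⟩
  intro s h0s hws hs
  exact h.2.2.2 s (by omega) hs

def TriA (t : Int) : Int := PySem.Int.floordiv (t * (t + 1)) 2

theorem pvG_eq_Tri (c0 w t : Int) : pvG c0 w t = TriA t - w * t - c0 := rfl

theorem twoTri (t : Int) : 2 * TriA t = t * t + t := by
  have h := twoG 0 0 t
  simp only [pvG_eq_Tri 0 0 t] at h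
  linarith

theorem Tri_succ (t : Int) : TriA (t + 1) = TriA t + (t + 1) := by
  have a := twoTri t
  have b := twoTri (t + 1)
  nlinarith [a, b]

def GoodP (x0 y0 u v t : Int) : Prop := 0 ≤ pvG x0 u t ∧ 0 ≤ pvG y0 v t

theorem good_iff (x0 y0 u v t : Int) :
    GoodP x0 y0 u v t ↔ (x0 + t * u ≤ TriA t ∧ y0 + t * v ≤ TriA t) := by
  unfold GoodP
  rw [pvG_eq_Tri, pvG_eq_Tri]
  constructor <;> intro h <;>
    exact ⟨by linarith [mul_comm u t, h.1], by linarith [mul_comm v t, h.2]⟩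

theorem loop_eq (u v x0 y0 N : Int) (hG : GoodP x0 y0 u v N)
    (hmin : ∀ s, 0 ≤ s → s < N → ¬GoodP x0 y0 u v s) :
    ∀ (fuel : Nat) (t : Int), 0 ≤ t → t ≤ N → (N - t).toNat < fuel →
      atraparLoop u v fuel (x0 + t * u, y0 + t * v) (TriA t, TriA t) (t, t) t = N := by
  intro fuel
  induction fuel with
  | zero => intro t _ _ h; omega
  | succ f ih =>
    intro t ht0 htN hf
    simp only [atraparLoop]
    rcases eq_or_lt_of_le htN with heq | hlt
    · subst heq
      have hc : ¬(TriA t < x0 + t * u ∨ TriA t < y0 + t * v) := by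
        have h := (good_iff x0 y0 u v t).1 hG
        push Not
        omega
      rw [if_neg hc]
    · have hc : TriA t < x0 + t * u ∨ TriA t < y0 + t * v := by
        have h := hmin t ht0 hlt
        rw [good_iff] at h
        by_contra hcon
        push Not at hcon
        exact h ⟨hcon.1, hcon.2⟩
      rw [if_pos hc]
      have e1 : x0 + t * u + u = x0 + (t + 1) * u := by ring
      have e2 : y0 + t * v + v = y0 + (t + 1) * v := by ring
      have e3 : TriA t + t + 1 = TriA (t + 1) := by have := Tri_succ t; omega
      rw [e1, e2, e3]
      have e4 : TriA (t + 1) - TriA t = t + 1 := by have := Tri_succ t; omega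
      rw [e4]
      exact ih (t + 1) (by omega) (by omega) (by omega)

-- A's result on initial data (x0, y0): it equals any N that is the least good time
theorem A_eq_least (x0 y0 u v N : Int) (hN0 : 0 ≤ N)
    (hG : GoodP x0 y0 u v N) (hmin : ∀ s, 0 ≤ s → s < N → ¬GoodP x0 y0 u v s)
    (hbound : N.toNat < 2 * (u.natAbs + v.natAbs + x0.natAbs + y0.natAbs) + 2) :
    atraparLoop u v (2 * (u.natAbs + v.natAbs + x0.natAbs + y0.natAbs) + 2)
      (x0, y0) (0, 0) (0, 0) 0 = N := by
  have h0 : TriA 0 = 0 := by decide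
  have := loop_eq u v x0 y0 N hG hmin
    (2 * (u.natAbs + v.natAbs + x0.natAbs + y0.natAbs) + 2) 0 (le_refl 0) hN0 (by omega)
  simpa [h0] using this

theorem good_max (x0 y0 u v : Int) :
    GoodP x0 y0 u v (max (pvFirstGe x0 u) (pvFirstGe y0 v)) := by
  have hx := firstGe_spec x0 u
  have hy := firstGe_spec y0 v
  rcases le_total (pvFirstGe x0 u) (pvFirstGe y0 v) with h | h
  · rw [max_eq_right h]
    exact ⟨le_trans hx.2.2.1 (g_mono x0 u (by omega) (by omega) h), hy.2.2.1⟩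
  · rw [max_eq_left h]
    exact ⟨hx.2.2.1, le_trans hy.2.2.1 (g_mono y0 v (by omega) (by omega) h)⟩

theorem shape (x0 y0 u v s : Int) (h0 : 0 ≤ s) (hg : GoodP x0 y0 u v s) :
    ∃ c, c ∈ [0, pvFirstGe x0 u, pvFirstGe y0 v, max (pvFirstGe x0 u) (pvFirstGe y0 v)] ∧
      GoodP x0 y0 u v c ∧ c ≤ s := by
  obtain ⟨hg1, hg2⟩ := hg
  have hx := firstGe_spec x0 u
  have hy := firstGe_spec y0 v
  by_cases hbx : pvFirstGe x0 u ≤ s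
  · by_cases hby : pvFirstGe y0 v ≤ s
    · exact ⟨max (pvFirstGe x0 u) (pvFirstGe y0 v), by simp, good_max x0 y0 u v, by omega⟩
    · -- s < bY : s stays left of v-1
      have hsv : ¬(v - 1 ≤ s) := fun hws => absurd (hy.2.2.2 s h0 hws (by omega)) (by omega)
      refine ⟨pvFirstGe x0 u, by simp, ⟨hx.2.2.1, ?_⟩, hbx⟩
      exact le_trans hg2 (g_anti y0 v (by omega) hbx (by omega))
  · have hsu : ¬(u - 1 ≤ s) := fun hws => absurd (hx.2.2.2 s h0 hws (by omega)) (by omega)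
    by_cases hby : pvFirstGe y0 v ≤ s
    · refine ⟨pvFirstGe y0 v, by simp, ⟨?_, hy.2.2.1⟩, hby⟩
      exact le_trans hg1 (g_anti x0 u (by omega) hby (by omega))
    · have hsv : ¬(v - 1 ≤ s) := fun hws => absurd (hy.2.2.2 s h0 hws (by omega)) (by omega)
      refine ⟨0, by simp, ⟨?_, ?_⟩, h0⟩
      · exact le_trans hg1 (g_anti x0 u (le_refl 0) h0 (by omega))
      · exact le_trans hg2 (g_anti y0 v (le_refl 0) h0 (by omega))

theorem alt_eq_least (x0 y0 u v N : Int) (hN0 : 0 ≤ N)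
    (hG : GoodP x0 y0 u v N) (hmin : ∀ s, 0 ≤ s → s < N → ¬GoodP x0 y0 u v s) :
    (PySem.List.min? ([0, pvFirstGe x0 u, pvFirstGe y0 v,
        max (pvFirstGe x0 u) (pvFirstGe y0 v)].filter
      (fun t => decide (0 ≤ pvG x0 u t) && decide (0 ≤ pvG y0 v t))) (fun t => t)).getD 0
      = N := by
  have hx := firstGe_spec x0 u
  have hy := firstGe_spec y0 v
  set cands := ([0, pvFirstGe x0 u, pvFirstGe y0 v,
      max (pvFirstGe x0 u) (pvFirstGe y0 v)].filter
    (fun t => decide (0 ≤ pvG x0 u t) && decide (0 ≤ pvG y0 v t))) with hcands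
  have hmaxmem : max (pvFirstGe x0 u) (pvFirstGe y0 v) ∈ cands := by
    rw [hcands, List.mem_filter]
    refine ⟨by simp, ?_⟩
    have := good_max x0 y0 u v
    simp [GoodP] at this
    simp [this.1, this.2]
  rcases hmq : PySem.List.min? cands (fun t => t) with _ | r
  · rw [PySem.List.min?_eq_none_iff] at hmq
    rw [hmq] at hmaxmem
    simp at hmaxmem
  · simp only [Option.getD_some]
    have hrmem := PySem.List.min?_mem hmq
    rw [hcands, List.mem_filter] at hrmem
    have hrgood : GoodP x0 y0 u v r := by
      have := hrmem.2
      simp only [Bool.and_eq_true, decide_eq_true_eq] at this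
      exact ⟨this.1, this.2⟩
    have hr0 : 0 ≤ r := by
      have := hrmem.1
      simp only [List.mem_cons] at this
      rcases this with h | h | h | h | h
      · omega
      · omega
      · omega
      · rcases max_choice (pvFirstGe x0 u) (pvFirstGe y0 v) with hm | hm <;> omega
      · simp at h
    have hNr : N ≤ r := by
      by_contra hcon
      exact hmin r hr0 (by omega) hrgood
    obtain ⟨c, hcmem, hcgood, hcle⟩ := shape x0 y0 u v N hN0 hG
    have hccand : c ∈ cands := by
      rw [hcands, List.mem_filter]
      exact ⟨hcmem, by simp only [Bool.and_eq_true, decide_eq_true_eq]; exact ⟨hcgood.1, hcgood.2⟩⟩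
    have := PySem.List.min?_isMin hmq c hccand
    omega

theorem core_eq (x0 y0 u v : Int) :
    atraparLoop u v (2 * (u.natAbs + v.natAbs + x0.natAbs + y0.natAbs) + 2)
      (x0, y0) (0, 0) (0, 0) 0 =
    (PySem.List.min? ([0, pvFirstGe x0 u, pvFirstGe y0 v,
        max (pvFirstGe x0 u) (pvFirstGe y0 v)].filter
      (fun t => decide (0 ≤ pvG x0 u t) && decide (0 ≤ pvG y0 v t))) (fun t => t)).getD 0 := by
  have habsu : |u| = (u.natAbs : Int) := Int.abs_eq_natAbs u
  have habsv : |v| = (v.natAbs : Int) := Int.abs_eq_natAbs v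
  have habsx : |x0| = (x0.natAbs : Int) := Int.abs_eq_natAbs x0
  have habsy : |y0| = (y0.natAbs : Int) := Int.abs_eq_natAbs y0
  have hn1 : GoodP x0 y0 u v
      ((2 * (u.natAbs + v.natAbs + x0.natAbs + y0.natAbs) + 1 : Nat) : Int) :=
    ⟨g_big x0 u _ (by push_cast; omega), g_big y0 v _ (by push_cast; omega)⟩
  have hd : DecidablePred (fun n : Nat => GoodP x0 y0 u v (n : Int)) := fun n => by
    unfold GoodP; infer_instance
  have hex : ∃ n : Nat, GoodP x0 y0 u v (n : Int) := ⟨_, hn1⟩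
  have hNg : GoodP x0 y0 u v ((@Nat.find _ hd hex : Nat) : Int) := @Nat.find_spec _ hd hex
  have hNle : @Nat.find _ hd hex ≤ 2 * (u.natAbs + v.natAbs + x0.natAbs + y0.natAbs) + 1 :=
    @Nat.find_min' _ hd hex _ hn1
  have hminI : ∀ s : Int, 0 ≤ s → s < ((@Nat.find _ hd hex : Nat) : Int) →
      ¬GoodP x0 y0 u v s := by
    intro s hs0 hsN hgood
    have hs : s = ((s.toNat : Nat) : Int) := by omega
    exact @Nat.find_min _ hd hex s.toNat (by omega) (by rw [← hs]; exact hgood)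
  exact (A_eq_least x0 y0 u v _ (by omega) hNg hminI (by omega)).trans
    (alt_eq_least x0 y0 u v _ (by omega) hNg hminI).symm

-- ===== VERDICT (by name: the statement is the Claim_ definition above) =====
theorem atraparLadron_spec : Claim_equal_atraparLadron := by
  unfold Claim_equal_atraparLadron
  intro posicionInicialLadron u v _ _
  unfold Spec_atraparLadron
  simp only [atraparLadron, atraparLadron_alt]
  exact core_eq _ _ u v
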